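-- pv_equiv track=rewrite | github.com/ThreeFive85/Algorithm | Programmers/level1/maxminLottos/maxminLottos.py | solution
-- ===== SOURCE A (Python) =====
-- def solution(lottos, win_nums):
--     answer = []
--     prize = {6: 1, 5: 2, 4: 3, 3: 4, 2: 5, 1: 6, 0: 6}
--     max_cnt = 0
--     min_cnt = 0
--     for num in lottos:
--         if num in win_nums:
--             max_cnt += 1
--             min_cnt += 1
--         elif num == 0:
--             max_cnt += 1
--
--     answer = [prize[max_cnt], prize[min_cnt]]
--     return answer
-- ===== SOURCE B (Python) =====
-- def solution(lottos, win_nums):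
--     freq = {}
--     for n in lottos:
--         freq[n] = freq.get(n, 0) + 1
--     hits = sum(v for k, v in freq.items() if k in win_nums)
--     zeros = 0 if 0 in win_nums else freq.get(0, 0)
--     return [min(6, 7 - hits - zeros), min(6, 7 - hits)]
-- ===== Notes on version B (the rewrite author's own statement) =====
-- stated objective: alternative
-- what changed: Replaces A's per-element classification loop and prize lookup dict with a frequency dictionary of lottos built once, a sum of counts over its distinct keys that match, a single lookup for the zero count, and the closed-form rank min(6, 7 - cnt).
import Mathlib
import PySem

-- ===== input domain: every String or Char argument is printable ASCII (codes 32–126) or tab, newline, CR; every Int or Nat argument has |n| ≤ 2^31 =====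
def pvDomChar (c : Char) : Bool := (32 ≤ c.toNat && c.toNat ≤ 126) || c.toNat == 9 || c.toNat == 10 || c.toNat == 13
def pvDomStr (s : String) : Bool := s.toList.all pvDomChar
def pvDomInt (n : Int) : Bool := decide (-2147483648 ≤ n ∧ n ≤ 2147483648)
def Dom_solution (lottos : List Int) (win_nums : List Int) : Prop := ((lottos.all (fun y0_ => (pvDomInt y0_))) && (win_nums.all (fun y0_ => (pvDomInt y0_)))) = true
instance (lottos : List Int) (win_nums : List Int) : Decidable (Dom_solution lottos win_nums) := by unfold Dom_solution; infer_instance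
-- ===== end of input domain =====

-- B builds a frequency dict of lottos once and sums over its distinct keys (the per-element
-- classification loop and the prize table disappear), ranking with min(6, 7 - cnt) (objective: alternative).

-- ===== PORT A =====
def solution (lottos : List Int) (win_nums : List Int) : List Int :=
  let prize : PySem.Dict Int Int :=
    PySem.Dict.ofList [(6, 1), (5, 2), (4, 3), (3, 4), (2, 5), (1, 6), (0, 6)]
  let cnt := lottos.foldl (fun (c : Int × Int) num =>
      if num ∈ win_nums then (c.1 + 1, c.2 + 1)
      else if num = 0 then (c.1 + 1, c.2)
      else c) (0, 0)
  -- prize[max_cnt] / prize[min_cnt]: KeyError (missing key) is excluded by Pre_solution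
  [(prize.get? cnt.1).getD 0, (prize.get? cnt.2).getD 0]

-- ===== PORT B =====
def solution_alt (lottos : List Int) (win_nums : List Int) : List Int :=
  let freq : PySem.Dict Int Int :=
    lottos.foldl (fun d n => d.insert n (d.getD n 0 + 1)) PySem.Dict.empty
  let hits : Int := ((freq.items.filter (fun p => decide (p.1 ∈ win_nums))).map (fun p => p.2)).sum
  let zeros : Int := if (0 : Int) ∈ win_nums then 0 else freq.getD 0 0
  [min 6 (7 - hits - zeros), min 6 (7 - hits)]

-- ===== PRECONDITION & SPEC =====
-- Pre_ excludes exactly the inputs on which A raises KeyError: more than 6 entries of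
-- lottos counted by A's loop (matches or zeros), so max_cnt ∉ the prize dict's keys.
def Pre_solution (lottos : List Int) (win_nums : List Int) : Prop :=
  lottos.countP (fun n => decide (n ∈ win_nums ∨ n = 0)) ≤ 6
instance (lottos : List Int) (win_nums : List Int) : Decidable (Pre_solution lottos win_nums) := by unfold Pre_solution; infer_instance
def pvWitness_solution : List Int × List Int := ([44, 1, 0, 0, 31, 25], [31, 10, 45, 1, 6, 19])

def Spec_solution (lottos : List Int) (win_nums : List Int) (out : List Int) : Prop := out = solution_alt lottos win_nums
instance (lottos : List Int) (win_nums : List Int) (out : List Int) : Decidable (Spec_solution lottos win_nums out) := by unfold Spec_solution; infer_instance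

-- ===== CLAIM (what is proved, stated in full; the proofs are below) =====
def Claim_equal_solution : Prop := ∀ (lottos : List Int) (win_nums : List Int), Dom_solution lottos win_nums → Pre_solution lottos win_nums → Spec_solution lottos win_nums (solution lottos win_nums)
-- ===== LEMMAS AND PROOFS =====

-- A's loop counts (matches-or-zeros, matches) via countP.
theorem solution_fold_eq (win_nums : List Int) (lottos : List Int) (m n : Int) :
    lottos.foldl (fun (c : Int × Int) num =>
      if num ∈ win_nums then (c.1 + 1, c.2 + 1)
      else if num = 0 then (c.1 + 1, c.2)
      else c) (m, n)
    = (m + (lottos.countP (fun x => decide (x ∈ win_nums ∨ x = 0)) : Int),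
       n + (lottos.countP (fun x => decide (x ∈ win_nums)) : Int)) := by
  induction lottos generalizing m n with
  | nil => simp
  | cons a t ih =>
    simp only [List.foldl_cons, List.countP_cons]
    by_cases h1 : a ∈ win_nums
    · have hc1 : decide (a ∈ win_nums ∨ a = 0) = true := by simp [h1]
      have hc2 : decide (a ∈ win_nums) = true := by simp [h1]
      rw [if_pos h1, ih]
      simp only [hc1, hc2, if_true, Prod.mk.injEq]
      constructor <;> push_cast <;> ring
    · have hc2 : decide (a ∈ win_nums) = false := by simp [h1]
      by_cases h2 : a = 0
      · have hc1 : decide (a ∈ win_nums ∨ a = 0) = true := by simp [h2]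
        rw [if_neg h1, if_pos h2, ih]
        simp only [hc1, hc2, if_true, Bool.false_eq_true, if_false, Nat.add_zero,
          Prod.mk.injEq]
        constructor <;> push_cast <;> ring
      · have hc1 : decide (a ∈ win_nums ∨ a = 0) = false := by simp [h1, h2]
        rw [if_neg h1, if_neg h2, ih]
        simp only [hc1, hc2, Bool.false_eq_true, if_false, Nat.add_zero]

-- The prize dict agrees with the min-clamped closed form on 0..6.
theorem prize_eq (c : Nat) (hc : c ≤ 6) :
    ((PySem.Dict.ofList ([(6, 1), (5, 2), (4, 3), (3, 4), (2, 5), (1, 6), (0, 6)] : List (Int × Int))).get? (c : Int)).getD 0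
    = min 6 (7 - (c : Int)) := by
  interval_cases c
  all_goals rfl

-- Int-cast a Nat sum over a list.
theorem sum_map_intCast {α : Type} (l : List α) (f : α → Nat) :
    (l.map (fun a => ((f a : Nat) : Int))).sum = ((l.map f).sum : Int) := by
  induction l with
  | nil => simp
  | cons a t ih => simp [ih]

-- B's hits: summing counts over the distinct matched keys counts the matched entries of lottos.
theorem hits_eq (lottos win_nums : List Int) :
    (((PySem.Set.ofList lottos).filter (fun k => decide (k ∈ win_nums))).map
        (fun k => ((lottos.count k : Nat) : Int))).sum
    = (lottos.countP (fun n => decide (n ∈ win_nums)) : Int) := by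
  rw [sum_map_intCast]
  have hperm : (PySem.Set.ofList lottos).Perm lottos.dedup := by
    rw [List.perm_ext_iff_of_nodup (PySem.Set.nodup_ofList lottos) lottos.nodup_dedup]
    intro a
    rw [PySem.Set.mem_ofList, List.mem_dedup]
  have := (hperm.filter (fun k => decide (k ∈ win_nums))).map (fun k => lottos.count k)
  rw [this.sum_eq, List.sum_map_count_dedup_filter_eq_countP]

-- With 0 not winning, matches-or-zeros splits into matches plus the zero count.
theorem countP_split0 (win_nums : List Int) (h0 : (0 : Int) ∉ win_nums) (lottos : List Int) :
    lottos.countP (fun n => decide (n ∈ win_nums ∨ n = 0))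
    = lottos.countP (fun n => decide (n ∈ win_nums)) + lottos.count 0 := by
  induction lottos with
  | nil => simp
  | cons a t ih =>
    simp only [List.countP_cons, List.count_cons, ih]
    by_cases hx : a ∈ win_nums
    · have ha0 : ¬ a = 0 := fun h => h0 (h ▸ hx)
      simp [hx, ha0]
      omega
    · by_cases ha0 : a = 0
      · simp [ha0, h0]
        omega
      · simp [hx, ha0]

-- ===== VERDICT (by name: the statement is the Claim_ definition above) =====
theorem solution_spec : Claim_equal_solution := by
  intro lottos win_nums _ hpre
  have h1 : lottos.countP (fun n => decide (n ∈ win_nums ∨ n = 0)) ≤ 6 := hpre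
  have h2 : lottos.countP (fun n => decide (n ∈ win_nums)) ≤ 6 :=
    le_trans (List.countP_mono_left (by intro x _ h; simp at h ⊢; exact Or.inl h)) h1
  unfold Spec_solution solution solution_alt
  simp only [solution_fold_eq, zero_add, PySem.Dict.foldl_insert_getD_add_one_eq_counter,
    PySem.Dict.items_counter, List.filter_map, List.map_map, Function.comp_def]
  rw [prize_eq _ h1, prize_eq _ h2]
  have hhits := hits_eq lottos win_nums
  rw [hhits]
  by_cases h0 : (0 : Int) ∈ win_nums
  · have : lottos.countP (fun n => decide (n ∈ win_nums ∨ n = 0))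
        = lottos.countP (fun n => decide (n ∈ win_nums)) := by
      apply List.countP_congr
      intro x _
      by_cases hx : x ∈ win_nums
      · simp [hx]
      · have hx0 : x ≠ 0 := fun h => hx (h ▸ h0)
        simp [hx, hx0]
    rw [if_pos h0, this]
    simp
  · rw [if_neg h0, PySem.Dict.getD_counter, countP_split0 win_nums h0 lottos]
    push_cast
    ring_nf
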